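-- pv_equiv track=rewrite | github.com/dips3095/bachelor-thesis | source.py | Hamming_soft
-- ===== SOURCE A (Python) =====
-- def Hamming_soft(list_of_classifiers, testvec):
--     res = []
--     mincnt = 0
--     flag = False
--     for resclass, classvec in enumerate(list_of_classifiers, 1):
--         i = 0
--         cnt = 0
--         while i < len(classvec):
--             if classvec[i] != testvec[i]: cnt += 1
--             i += 1
--         if flag == False and mincnt == 0:
--             mincnt = cnt
--             flag = True
--         if flag == True and cnt == mincnt: res.append(resclass)
--         if flag == True and cnt < mincnt:
--             res.clear()
--             mincnt = cnt
--             res.append(resclass)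
--     return res
-- ===== SOURCE B (Python) =====
-- def Hamming_soft(list_of_classifiers, testvec):
--     dists = [sum(1 if cv[i] != testvec[i] else 0 for i in range(len(cv)))
--              for cv in list_of_classifiers]
--     if not dists:
--         return []
--     m = min(dists)
--     return [i + 1 for i, d in enumerate(dists) if d == m]
-- ===== Notes on version B (the rewrite author's own statement) =====
-- stated objective: simpler
-- what changed: The single-pass running-minimum state machine (res/mincnt/flag mutated per element) is replaced by a two-pass decomposition: build the full distance table, take min once, then filter the 1-based indices equal to it.
import Mathlib
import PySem

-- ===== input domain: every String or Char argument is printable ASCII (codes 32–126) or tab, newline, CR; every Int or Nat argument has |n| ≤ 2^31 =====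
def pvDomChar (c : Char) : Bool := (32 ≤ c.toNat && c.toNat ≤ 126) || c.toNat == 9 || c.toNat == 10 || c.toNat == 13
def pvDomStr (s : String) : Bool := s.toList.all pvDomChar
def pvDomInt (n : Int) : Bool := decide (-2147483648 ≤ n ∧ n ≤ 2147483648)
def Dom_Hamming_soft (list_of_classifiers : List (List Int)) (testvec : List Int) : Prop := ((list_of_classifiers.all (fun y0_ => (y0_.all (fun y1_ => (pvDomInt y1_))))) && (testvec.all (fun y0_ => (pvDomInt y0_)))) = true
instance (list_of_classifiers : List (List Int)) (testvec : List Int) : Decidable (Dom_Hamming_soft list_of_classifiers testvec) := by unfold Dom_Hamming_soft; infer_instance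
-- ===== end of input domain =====

-- B replaces A's single-pass running-minimum state machine by a plainer two-pass
-- decomposition (distance table, then min, then filter of matching 1-based indices); same cost.


-- ===== PORT A =====
-- the `while i < len(classvec)` counting loop of A, step for step (i counts up, cnt accumulates)
def hsCount (classvec testvec : List Int) (i : Nat) (cnt : Int) : Int :=
  if i < classvec.length then
    hsCount classvec testvec (i + 1)
      (if classvec.getD i 0 ≠ testvec.getD i 0 then cnt + 1 else cnt)
  else cnt
termination_by classvec.length - i

-- one iteration of A's `for resclass, classvec in enumerate(list_of_classifiers, 1)` loop;
-- state = (res, mincnt, flag, resclass)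
def hsStep (testvec : List Int) (st : List Int × Int × Bool × Int) (classvec : List Int) :
    List Int × Int × Bool × Int :=
  let res := st.1; let mincnt := st.2.1; let flag := st.2.2.1; let resclass := st.2.2.2
  let cnt := hsCount classvec testvec 0 0
  let p := if flag = false ∧ mincnt = 0 then (cnt, true) else (mincnt, flag)
  let mincnt := p.1; let flag := p.2
  let res := if flag = true ∧ cnt = mincnt then res ++ [resclass] else res
  let q := if flag = true ∧ cnt < mincnt then (([resclass] : List Int), cnt) else (res, mincnt)
  (q.1, q.2, flag, resclass + 1)

def Hamming_soft (list_of_classifiers : List (List Int)) (testvec : List Int) : List Int :=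
  (list_of_classifiers.foldl (hsStep testvec) (([] : List Int), (0 : Int), false, (1 : Int))).1

-- ===== PORT B =====
-- `sum(1 if cv[i] != testvec[i] else 0 for i in range(len(cv)))`
def hsDist (testvec classvec : List Int) : Int :=
  (List.range classvec.length).foldl
    (fun s i => s + (if classvec.getD i 0 ≠ testvec.getD i 0 then 1 else 0)) 0

def Hamming_soft_alt (list_of_classifiers : List (List Int)) (testvec : List Int) : List Int :=
  let dists := list_of_classifiers.map (hsDist testvec)
  match dists with
  | [] => []
  | d :: rest =>
    let m := rest.foldl min d
    ((dists.zipIdx 1).filter (fun p => p.1 == m)).map (fun p => (p.2 : Int))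

-- ===== PRECONDITION & SPEC =====
-- Pre_ excludes exactly the inputs where Python A raises IndexError: some classifier vector
-- longer than testvec (A indexes testvec[i] for every i < len(classvec)).
def Pre_Hamming_soft (list_of_classifiers : List (List Int)) (testvec : List Int) : Prop :=
  ∀ cv ∈ list_of_classifiers, cv.length ≤ testvec.length
instance (list_of_classifiers : List (List Int)) (testvec : List Int) : Decidable (Pre_Hamming_soft list_of_classifiers testvec) := by unfold Pre_Hamming_soft; infer_instance
def pvWitness_Hamming_soft : List (List Int) × List Int := ([[1, 2], [1, 3], [0, 2]], [1, 2])

def Spec_Hamming_soft (list_of_classifiers : List (List Int)) (testvec : List Int) (out : List Int) : Prop := out = Hamming_soft_alt list_of_classifiers testvec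
instance (list_of_classifiers : List (List Int)) (testvec : List Int) (out : List Int) : Decidable (Spec_Hamming_soft list_of_classifiers testvec out) := by unfold Spec_Hamming_soft; infer_instance

-- ===== CLAIM (what is proved, stated in full; the proofs are below) =====
def Claim_equal_Hamming_soft : Prop := ∀ (list_of_classifiers : List (List Int)) (testvec : List Int), Dom_Hamming_soft list_of_classifiers testvec → Pre_Hamming_soft list_of_classifiers testvec → Spec_Hamming_soft list_of_classifiers testvec (Hamming_soft list_of_classifiers testvec)

-- ===== LEMMAS AND PROOFS =====

-- A's counting loop equals a fold over range' (bridging while-recursion to B's range fold)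
theorem hsCount_eq_fold (classvec testvec : List Int) :
    ∀ fuel i cnt, classvec.length - i = fuel →
      hsCount classvec testvec i cnt =
      (List.range' i fuel).foldl
        (fun s j => s + (if classvec.getD j 0 ≠ testvec.getD j 0 then 1 else 0)) cnt := by
  intro fuel
  induction fuel with
  | zero =>
      intro i cnt h
      rw [hsCount]
      simp [Nat.not_lt.mpr (Nat.le_of_sub_eq_zero h)]
  | succ f ih =>
      intro i cnt h
      have hi : i < classvec.length := by omega
      rw [hsCount, if_pos hi, List.range'_succ, List.foldl_cons, ih (i + 1) _ (by omega)]
      congr 1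
      split <;> omega

theorem hsCount_eq_dist (classvec testvec : List Int) :
    hsCount classvec testvec 0 0 = hsDist testvec classvec := by
  rw [hsCount_eq_fold classvec testvec classvec.length 0 0 (by omega), hsDist,
    List.range_eq_range']

-- the pure "running minimum with 1-based positions" recursion A performs once flag is true
def minsel (res : List Int) (m : Int) (j : Int) : List Int → List Int
  | [] => res
  | d :: ds =>
      if d < m then minsel [j] d (j + 1) ds
      else if d = m then minsel (res ++ [j]) m (j + 1) ds
      else minsel res m (j + 1) ds

-- positions (from j) whose distance equals M
def posEq (M : Int) (j : Int) : List Int → List Int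
  | [] => []
  | d :: ds => (if d = M then [j] else []) ++ posEq M (j + 1) ds

theorem foldl_min_le (ds : List Int) : ∀ m : Int, ds.foldl min m ≤ m := by
  induction ds with
  | nil => intro m; simp
  | cons d ds ih =>
      intro m
      calc (d :: ds).foldl min m = ds.foldl min (min m d) := by simp
        _ ≤ min m d := ih _
        _ ≤ m := min_le_left _ _

-- A's flag=true fold, characterised: keep res only if m is still minimal, then all minimal positions
theorem minsel_spec (ds : List Int) :
    ∀ res m j, minsel res m j ds =
      (if ds.foldl min m = m then res else []) ++ posEq (ds.foldl min m) j ds := by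
  induction ds with
  | nil => intro res m j; simp [minsel, posEq]
  | cons d ds ih =>
      intro res m j
      have hle : ds.foldl min (min m d) ≤ min m d := foldl_min_le ds (min m d)
      rcases lt_trichotomy d m with hlt | heq | hgt
      · have hmin : min m d = d := min_eq_right hlt.le
        rw [minsel, if_pos hlt, ih]
        have hM : (d :: ds).foldl min m = ds.foldl min d := by simp [hmin]
        rw [hM]
        have h1 : ¬ ds.foldl min d = m := by rw [hmin] at hle; omega
        rw [if_neg h1]
        by_cases hd : ds.foldl min d = d
        · simp [posEq, hd]
        · have hne : ¬ d = ds.foldl min d := fun h => hd h.symm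
          simp [posEq, hd, hne]
      · have hmin : min m d = m := min_eq_left heq.ge
        rw [minsel, if_neg (by omega), if_pos heq, ih]
        have hM : (d :: ds).foldl min m = ds.foldl min m := by simp [hmin]
        rw [hM]
        subst heq
        by_cases hm : ds.foldl min d = d
        · simp [posEq, hm, List.append_assoc]
        · have hne : ¬ d = ds.foldl min d := fun h => hm h.symm
          simp [posEq, hm, hne]
      · have hmin : min m d = m := min_eq_left hgt.le
        rw [minsel, if_neg (by omega), if_neg (by omega), ih]
        have hM : (d :: ds).foldl min m = ds.foldl min m := by simp [hmin]
        rw [hM]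
        have hne : ¬ d = ds.foldl min m := by rw [hmin] at hle; omega
        simp [posEq, hne]

-- A's fold with flag = true is exactly minsel on the distance table
theorem foldl_hsStep_true (testvec : List Int) (cvs : List (List Int)) :
    ∀ res m j, (cvs.foldl (hsStep testvec) (res, m, true, j)).1 =
      minsel res m j (cvs.map (hsDist testvec)) := by
  induction cvs with
  | nil => intro res m j; simp [minsel]
  | cons cv cvs ih =>
      intro res m j
      rw [List.foldl_cons, List.map_cons]
      have hd := hsCount_eq_dist cv testvec
      set d := hsDist testvec cv with hdd
      rcases lt_trichotomy d m with hlt | heq | hgt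
      · have : hsStep testvec (res, m, true, j) cv = ([j], d, true, j + 1) := by
          simp [hsStep, hd, if_neg (by omega : ¬ d = m), if_pos hlt]
        rw [this, ih, minsel, if_pos hlt]
      · have : hsStep testvec (res, m, true, j) cv = (res ++ [j], m, true, j + 1) := by
          simp [hsStep, hd, heq]
        rw [this, ih, minsel, if_neg (by omega), if_pos heq]
      · have : hsStep testvec (res, m, true, j) cv = (res, m, true, j + 1) := by
          simp [hsStep, hd, if_neg (by omega : ¬ d = m), if_neg (by omega : ¬ d < m)]
        rw [this, ih, minsel, if_neg (by omega), if_neg (by omega)]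

-- B's filter of the enumerated distance table is posEq
theorem filter_zipIdx_eq_posEq (M : Int) (ds : List Int) :
    ∀ k : Nat, ((ds.zipIdx k).filter (fun p => p.1 == M)).map (fun p => ((p.2 : Nat) : Int)) =
      posEq M (k : Int) ds := by
  induction ds with
  | nil => intro k; simp [posEq]
  | cons d ds ih =>
      intro k
      have hcast : ((k + 1 : Nat) : Int) = (k : Int) + 1 := by push_cast; ring
      have h := ih (k + 1); rw [hcast] at h
      rw [List.zipIdx_cons, List.filter_cons]
      by_cases hd : d = M
      · rw [if_pos (by simp [hd]), List.map_cons, h]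
        simp [posEq, hd]
      · rw [if_neg (by simp [hd]), h]
        simp [posEq, hd]

-- ===== VERDICT (by name: the statement is the Claim_ definition above) =====
theorem Hamming_soft_spec : Claim_equal_Hamming_soft := by
  intro lst tv _ _
  unfold Spec_Hamming_soft Hamming_soft Hamming_soft_alt
  cases lst with
  | nil => simp
  | cons cv cvs =>
      rw [List.foldl_cons]
      have hstep : hsStep tv (([] : List Int), (0 : Int), false, (1 : Int)) cv
          = ([1], hsDist tv cv, true, 2) := by
        simp [hsStep, hsCount_eq_dist]
      rw [hstep, foldl_hsStep_true, List.map_cons, minsel_spec]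
      simp only [List.map_cons]  -- iota-reduces B's match on the cons distance list
      rw [filter_zipIdx_eq_posEq]
      norm_num [posEq]
      split_ifs with h1 h2
      all_goals first | rfl | (exfalso; omega)
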